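-- pv_equiv track=rewrite | github.com/Rinesamerovci/InsightClips | backend/app/services/search_service.py | _resolve_match_reason
-- ===== SOURCE A (Python) =====
-- def _resolve_match_reason(matched_fields: list[str]) -> str | None:
--     priorities = [
--         ("title", "Matched clip title"),
--         ("keywords", "Matched clip keywords"),
--         ("transcript", "Matched clip transcript"),
--         ("podcast_title", "Matched podcast title"),
--         ("clip_number", "Matched clip number"),
--     ]
--     matched = set(matched_fields)
--     for field, reason in priorities:
--         if field in matched:
--             return reason
--     return None
-- ===== SOURCE B (Python) =====
-- _ORDER = {"title": 0, "keywords": 1, "transcript": 2, "podcast_title": 3, "clip_number": 4}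
-- _REASONS = [
--     "Matched clip title",
--     "Matched clip keywords",
--     "Matched clip transcript",
--     "Matched podcast title",
--     "Matched clip number",
-- ]
--
-- def _resolve_match_reason(matched_fields: list[str]) -> str | None:
--     best = None
--     for f in matched_fields:
--         i = _ORDER.get(f)
--         if i is not None and (best is None or i < best):
--             best = i
--     return None if best is None else _REASONS[best]
-- ===== Notes on version B (the rewrite author's own statement) =====
-- stated objective: alternative
-- what changed: B makes a single pass over matched_fields keeping the smallest priority index via a field->index map, instead of building a set and scanning the fixed priority list for the first membership hit.
import Mathlib
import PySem

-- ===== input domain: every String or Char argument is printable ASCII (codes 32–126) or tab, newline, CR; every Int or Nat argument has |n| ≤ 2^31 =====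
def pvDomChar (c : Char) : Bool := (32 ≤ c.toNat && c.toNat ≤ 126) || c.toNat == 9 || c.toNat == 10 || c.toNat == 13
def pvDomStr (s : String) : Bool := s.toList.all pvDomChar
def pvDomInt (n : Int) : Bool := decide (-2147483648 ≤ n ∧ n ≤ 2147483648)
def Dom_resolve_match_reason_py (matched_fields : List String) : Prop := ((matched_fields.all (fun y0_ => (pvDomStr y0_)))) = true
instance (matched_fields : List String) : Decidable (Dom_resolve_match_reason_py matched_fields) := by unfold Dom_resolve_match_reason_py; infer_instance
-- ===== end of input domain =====

-- B replaces A's set-build-then-scan-priorities with a single argmin pass over matched_fields (objective: alternative).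


-- ===== PORT A =====
-- the 'for field, reason in priorities: if field in matched: return reason' loop
def rmrLoopA (matched : PySem.Set String) : List (String × String) → Option String
  | [] => none
  | (field, reason) :: rest =>
      if PySem.Set.contains matched field then some reason else rmrLoopA matched rest

def resolve_match_reason_py (matched_fields : List String) : Option String :=
  let priorities : List (String × String) :=
    [("title", "Matched clip title"),
     ("keywords", "Matched clip keywords"),
     ("transcript", "Matched clip transcript"),
     ("podcast_title", "Matched podcast title"),
     ("clip_number", "Matched clip number")]
  let matched := PySem.Set.ofList matched_fields
  rmrLoopA matched priorities

-- ===== PORT B =====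
def rmrOrder : PySem.Dict String Nat :=
  PySem.Dict.ofList [("title", 0), ("keywords", 1), ("transcript", 2), ("podcast_title", 3), ("clip_number", 4)]

def rmrReasons : List String :=
  ["Matched clip title", "Matched clip keywords", "Matched clip transcript",
   "Matched podcast title", "Matched clip number"]

-- the loop body: i = _ORDER.get(f); if i is not None and (best is None or i < best): best = i
def rmrStep (best : Option Nat) (f : String) : Option Nat :=
  match PySem.Dict.get? rmrOrder f with
  | none => best
  | some i =>
      match best with
      | none => some i
      | some b => if i < b then some i else best

def resolve_match_reason_py_alt (matched_fields : List String) : Option String :=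
  match matched_fields.foldl rmrStep none with
  | none => none
  | some b => rmrReasons[b]?

-- ===== PRECONDITION & SPEC =====
def Spec_resolve_match_reason_py (matched_fields : List String) (out : Option String) : Prop := out = resolve_match_reason_py_alt matched_fields
instance (matched_fields : List String) (out : Option String) : Decidable (Spec_resolve_match_reason_py matched_fields out) := by unfold Spec_resolve_match_reason_py; infer_instance

-- ===== CLAIM (what is proved, stated in full; the proofs are below) =====
def Claim_equal_resolve_match_reason_py : Prop := ∀ (matched_fields : List String), Dom_resolve_match_reason_py matched_fields → Spec_resolve_match_reason_py matched_fields (resolve_match_reason_py matched_fields)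

-- ===== LEMMAS AND PROOFS =====

-- option-min combine: B's step is omin with the looked-up index
def rmrOmin (a b : Option Nat) : Option Nat :=
  match a, b with
  | none, b => b
  | a, none => a
  | some x, some y => some (min x y)

theorem rmrStep_eq_omin (best : Option Nat) (f : String) :
    rmrStep best f = rmrOmin best (PySem.Dict.get? rmrOrder f) := by
  unfold rmrStep rmrOmin
  cases PySem.Dict.get? rmrOrder f with
  | none => cases best <;> rfl
  | some i =>
      cases best with
      | none => rfl
      | some b =>
          by_cases h : i < b
          · simp [h]; omega
          · simp [h]; omega

theorem rmrOmin_assoc (a b c : Option Nat) : rmrOmin (rmrOmin a b) c = rmrOmin a (rmrOmin b c) := by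
  unfold rmrOmin; cases a <;> cases b <;> cases c <;> simp [Nat.min_assoc]

-- the minimum index appearing in the list
def rmrMin (l : List String) : Option Nat :=
  match l with
  | [] => none
  | f :: rest => rmrOmin (PySem.Dict.get? rmrOrder f) (rmrMin rest)

theorem rmrFold_eq (l : List String) (acc : Option Nat) :
    l.foldl rmrStep acc = rmrOmin acc (rmrMin l) := by
  induction l generalizing acc with
  | nil => cases acc <;> rfl
  | cons f rest ih =>
      simp only [List.foldl_cons, rmrStep_eq_omin, ih, rmrMin, ← rmrOmin_assoc]

theorem rmrOrder_get (f : String) :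
    PySem.Dict.get? rmrOrder f =
      if f = "title" then some 0 else if f = "keywords" then some 1
      else if f = "transcript" then some 2 else if f = "podcast_title" then some 3
      else if f = "clip_number" then some 4 else none := by
  have hmk : rmrOrder = PySem.Dict.mk [("title", (0 : Nat)), ("keywords", 1), ("transcript", 2), ("podcast_title", 3), ("clip_number", 4)] := by decide
  rw [hmk]
  simp only [PySem.Dict.get?_mk_cons, beq_iff_eq]
  by_cases h1 : f = "title" <;> by_cases h2 : f = "keywords" <;>
    by_cases h3 : f = "transcript" <;> by_cases h4 : f = "podcast_title" <;>
    by_cases h5 : f = "clip_number" <;>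
  simp_all [PySem.Dict.get?, eq_comm]

-- rmrMin characterised by the five memberships
theorem rmrMin_char (l : List String) :
    rmrMin l =
      if "title" ∈ l then some 0 else if "keywords" ∈ l then some 1
      else if "transcript" ∈ l then some 2 else if "podcast_title" ∈ l then some 3
      else if "clip_number" ∈ l then some 4 else none := by
  induction l with
  | nil => simp [rmrMin]
  | cons f rest ih =>
      simp only [rmrMin, ih, rmrOrder_get, List.mem_cons]
      by_cases h1 : f = "title" <;> by_cases h2 : f = "keywords" <;>
        by_cases h3 : f = "transcript" <;> by_cases h4 : f = "podcast_title" <;>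
        by_cases h5 : f = "clip_number" <;>
      simp_all <;>
      (try split_ifs <;> simp_all [rmrOmin])

-- ===== VERDICT (by name: the statement is the Claim_ definition above) =====
theorem resolve_match_reason_py_spec : Claim_equal_resolve_match_reason_py := by
  intro l _
  unfold Spec_resolve_match_reason_py resolve_match_reason_py resolve_match_reason_py_alt
  simp only [rmrFold_eq, rmrMin_char, rmrLoopA]
  by_cases h1 : "title" ∈ l <;> by_cases h2 : "keywords" ∈ l <;>
    by_cases h3 : "transcript" ∈ l <;> by_cases h4 : "podcast_title" ∈ l <;>
    by_cases h5 : "clip_number" ∈ l <;>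
  simp_all [rmrOmin, rmrReasons, PySem.Set.mem_ofList]
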